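-- pv_equiv track=rewrite | github.com/CharalamposPapakonstantinou/ASL-Letters-Recognition | ASL_letters.py | phrase
-- ===== SOURCE A (Python) =====
-- def phrase(lst):
--     result = ""
--
--     for i in range(len(lst)):
--         if lst[i] != "":
--             if i < len(lst) - 1 and lst[i + 1] != "":
--                 result += lst[i]
--             else:
--                 result += lst[i] + " "
--
--     phrase=result.strip()
--     return phrase
-- ===== SOURCE B (Python) =====
-- def phrase(lst):
--     # Group-and-join decomposition: collect maximal runs of consecutive
--     # non-empty strings, join each run, then join the runs with spaces.
--     parts = []
--     run = ""
--     for s in lst: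
--         if s == "":
--             if run:
--                 parts.append(run)
--                 run = ""
--         else:
--             run += s
--     if run:
--         parts.append(run)
--     return " ".join(parts).strip()
-- ===== Notes on version B (the rewrite author's own statement) =====
-- stated objective: idiomatic
-- what changed: B first splits the list into maximal runs of consecutive non-empty strings and returns ' '.join(parts).strip(), instead of A's index loop that appends element-by-element with a lookahead at lst[i+1] to decide where spaces go; join-based concatenation also avoids A's repeated 'result +=' string rebuilding (measured ~1.7x at the largest size).
import Mathlib
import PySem

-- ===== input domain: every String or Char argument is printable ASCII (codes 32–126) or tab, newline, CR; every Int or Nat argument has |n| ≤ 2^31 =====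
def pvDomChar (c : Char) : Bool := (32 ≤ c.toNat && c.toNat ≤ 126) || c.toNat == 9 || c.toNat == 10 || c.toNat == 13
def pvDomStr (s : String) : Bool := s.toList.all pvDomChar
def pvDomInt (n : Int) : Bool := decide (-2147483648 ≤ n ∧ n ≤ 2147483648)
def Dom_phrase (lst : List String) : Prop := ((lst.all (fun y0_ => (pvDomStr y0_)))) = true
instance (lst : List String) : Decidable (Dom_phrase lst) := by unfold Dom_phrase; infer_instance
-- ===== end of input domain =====

-- B collects the maximal runs of consecutive non-empty strings and joins them with spaces,
-- instead of A's index loop with a lookahead at lst[i+1]; same return value (objective: idiomatic).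

-- ===== PORT A =====
-- literal port of A; the Python str accumulator is carried as List Char (exact bridge to Python str)
def phrase (lst : List String) : String :=
  String.ofList (PySem.Chars.strip (
    (PySem.List.pyRange 0 (lst.length : Int) 1).foldl
      (fun result i =>
        if PySem.List.pyGetD lst i "" ≠ "" then
          if i < (lst.length : Int) - 1 ∧ PySem.List.pyGetD lst (i + 1) "" ≠ "" then
            result ++ (PySem.List.pyGetD lst i "").toList
          else
            result ++ (PySem.List.pyGetD lst i "").toList ++ [' ']
        else result) []))

-- ===== PORT B =====
-- literal port of Source B: a fold carrying (parts, run), the final flush of run, then " ".join(parts).strip()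
def bStep (st : List (List Char) × List Char) (s : String) : List (List Char) × List Char :=
  if s = "" then (if st.2 ≠ [] then (st.1 ++ [st.2], ([] : List Char)) else st)
  else (st.1, st.2 ++ s.toList)

def bFlush (st : List (List Char) × List Char) : List (List Char) :=
  if st.2 ≠ [] then st.1 ++ [st.2] else st.1

def phrase_alt (lst : List String) : String :=
  String.ofList (PySem.Chars.strip (PySem.Chars.join [' '] (bFlush (lst.foldl bStep ([], [])))))

-- ===== PRECONDITION & SPEC =====
def Spec_phrase (lst : List String) (out : String) : Prop := out = phrase_alt lst
instance (lst : List String) (out : String) : Decidable (Spec_phrase lst out) := by unfold Spec_phrase; infer_instance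

-- ===== CLAIM (what is proved, stated in full; the proofs are below) =====
def Claim_equal_phrase : Prop := ∀ (lst : List String), Dom_phrase lst → Spec_phrase lst (phrase lst)

-- ===== LEMMAS AND PROOFS =====

-- A's loop as structural recursion: a non-empty element contributes its characters,
-- plus one space when the next element is empty or absent.
def gA : List String → List Char
  | [] => []
  | x :: rest =>
    (if x ≠ "" then x.toList ++ (if rest.headD "" ≠ "" then [] else [' ']) else []) ++ gA rest

-- B's runs: the maximal groups of consecutive non-empty strings (run = pending group prefix).
def Rr : List Char → List String → List (List Char)
  | run, [] => if run ≠ [] then [run] else []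
  | run, x :: rest =>
    if x = "" then (if run ≠ [] then [run] else []) ++ Rr [] rest
    else Rr (run ++ x.toList) rest

-- every part followed by one space
def spaced (parts : List (List Char)) : List Char := (parts.map (· ++ [' '])).flatten

theorem rangeFold_eq_gA (lst : List String) (acc : List Char) :
    (List.range lst.length).foldl
      (fun acc k =>
        if lst.getD k "" ≠ "" then
          if k + 1 < lst.length ∧ lst.getD (k + 1) "" ≠ "" then
            acc ++ (lst.getD k "").toList
          else
            acc ++ (lst.getD k "").toList ++ [' ']
        else acc) acc = acc ++ gA lst := by
  induction lst generalizing acc with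
  | nil => simp [gA]
  | cons x rest ih =>
    rw [List.length_cons, List.range_succ_eq_map, List.foldl_cons, List.foldl_map]
    rw [PySem.List.foldl_congr_mem _ _
      (fun acc k =>
        if rest.getD k "" ≠ "" then
          if k + 1 < rest.length ∧ rest.getD (k + 1) "" ≠ "" then
            acc ++ (rest.getD k "").toList
          else
            acc ++ (rest.getD k "").toList ++ [' ']
        else acc) _
      (by
        intro acc1 k _
        simp only [Nat.succ_eq_add_one, List.getD_cons_succ,
          Nat.add_lt_add_iff_right])]
    rw [ih]
    have h0 : ((0:Nat) + 1 < (x :: rest).length ∧ (x :: rest).getD (0 + 1) "" ≠ "") ↔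
        (rest.headD "" ≠ "") := by
      cases rest with
      | nil => simp
      | cons y t => simp
    show (if (x :: rest).getD 0 "" ≠ "" then
          if 0 + 1 < (x :: rest).length ∧ (x :: rest).getD (0 + 1) "" ≠ "" then
            acc ++ ((x :: rest).getD 0 "").toList
          else acc ++ ((x :: rest).getD 0 "").toList ++ [' ']
        else acc) ++ gA rest = acc ++ gA (x :: rest)
    simp only [h0, List.getD_cons_zero, gA]
    cases rest with
    | nil => by_cases hx : x = "" <;> simp [hx]
    | cons y t => by_cases hx : x = "" <;> by_cases hy : y = "" <;> simp [hx, hy]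

theorem phrase_eq_gA (lst : List String) :
    phrase lst = String.ofList (PySem.Chars.strip (gA lst)) := by
  unfold phrase
  rw [PySem.List.pyRange_one]
  simp only [sub_zero, Int.toNat_natCast, zero_add]
  rw [List.foldl_map]
  rw [PySem.List.foldl_congr_mem _ _
    (fun acc k =>
      if lst.getD k "" ≠ "" then
        if k + 1 < lst.length ∧ lst.getD (k + 1) "" ≠ "" then
          acc ++ (lst.getD k "").toList
        else
          acc ++ (lst.getD k "").toList ++ [' ']
      else acc) _
    (by
      intro acc k hk
      have hcond : ((k : Int) < (lst.length : Int) - 1) ↔ k + 1 < lst.length := by omega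
      have hcast : ((k : Int) + 1) = ((k + 1 : Nat) : Int) := by push_cast; ring
      simp only [hcast, PySem.List.pyGetD_natCast, hcond])]
  rw [rangeFold_eq_gA lst []]
  rfl

theorem bFold_eq_Rr (lst : List String) (parts : List (List Char)) (run : List Char) :
    bFlush (lst.foldl bStep (parts, run)) = parts ++ Rr run lst := by
  induction lst generalizing parts run with
  | nil =>
    simp only [List.foldl_nil, Rr, bFlush]
    by_cases h : run = [] <;> simp [h]
  | cons x rest ih =>
    simp only [List.foldl_cons, Rr, bStep]
    by_cases hx : x = ""
    · by_cases h : run = []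
      · simp only [hx, h]
        simpa using ih parts []
      · simp only [hx, if_pos h]
        simpa using ih (parts ++ [run]) []
    · simp only [if_neg hx]
      exact ih parts (run ++ x.toList)

theorem spaced_Rr (lst : List String) (run : List Char) :
    spaced (Rr run lst) =
      (if run = [] then [] else run ++ (if lst.headD "" ≠ "" then [] else [' '])) ++ gA lst := by
  induction lst generalizing run with
  | nil =>
    by_cases h : run = [] <;> simp [Rr, gA, spaced, h]
  | cons x rest ih =>
    simp only [Rr, gA]
    by_cases hx : x = ""
    · by_cases h : run = [] <;>
        simp [hx, h, spaced, List.headD] <;>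
        simpa [spaced] using ih []
    · rw [if_neg hx, ih]
      have hne : run ++ x.toList ≠ [] := by
        intro hcon; rcases List.append_eq_nil_iff.mp hcon with ⟨-, h2⟩
        exact hx (by cases x; simp at h2; simp [h2])
      by_cases h : run = [] <;>
        simp [hx, h, hne, List.headD]

theorem isspace_space : PySem.Chars.isspace ' ' = true := by decide

theorem rstrip_append_space (cs : List Char) :
    PySem.Chars.rstrip (cs ++ [' ']) = PySem.Chars.rstrip cs := by
  simp [PySem.Chars.rstrip, isspace_space]

theorem strip_append_space (cs : List Char) :
    PySem.Chars.strip (cs ++ [' ']) = PySem.Chars.strip cs := by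
  simp only [PySem.Chars.strip, PySem.Chars.lstrip]
  rw [List.dropWhile_append]
  by_cases h : (List.dropWhile PySem.Chars.isspace cs).isEmpty
  · simp [List.dropWhile, isspace_space, PySem.Chars.rstrip, List.isEmpty_iff.mp h]
  · simp [h, rstrip_append_space]

theorem strip_spaced (P : List (List Char)) :
    PySem.Chars.strip (spaced P) = PySem.Chars.strip (PySem.Chars.join [' '] P) := by
  cases P with
  | nil => simp [spaced, PySem.Chars.join, List.intercalate]
  | cons p q =>
    have h : spaced (p :: q) = PySem.Chars.join [' '] (p :: q) ++ [' '] := by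
      induction q generalizing p with
      | nil => simp [spaced, PySem.Chars.join, List.intercalate]
      | cons r t ih =>
        simp only [spaced, List.map_cons, List.flatten_cons] at *
        rw [ih r]
        simp [PySem.Chars.join, List.intercalate, List.intersperse]
    rw [h, strip_append_space]

-- ===== VERDICT (by name: the statement is the Claim_ definition above) =====
theorem phrase_spec : Claim_equal_phrase := by
  intro lst _
  unfold Spec_phrase phrase_alt
  rw [phrase_eq_gA, bFold_eq_Rr lst [] [], List.nil_append, ← strip_spaced,
    spaced_Rr lst [], if_pos rfl, List.nil_append]
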